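-- pv_equiv track=rewrite | github.com/rahulsingh3292/DSA- | Arrays_and_String/equalRowAndCol.py | eualPairs
-- ===== SOURCE A (Python) =====
-- def eualPairs(matrix):
--   n = len(matrix)
--   col_dict = {}
--
--
--   for row in range(n):
--     col_data= list()
--     for col in range(n):
--       col_data.append(matrix[col][row])
--     col_data=tuple(col_data)
--     if col_data in col_dict:
--       col_dict[col_data]+=1
--     else:
--
--       col_dict[col_data]=1
--
--   count = 0
--   for row in range(n):
--     col_data = list()
--     for col in range(n):
--       col_data.append(matrix[row][col])
--     col_data=tuple(col_data)
--     if col_data in col_dict: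
--        count +=col_dict[col_data]
--   return count
-- ===== SOURCE B (Python) =====
-- def eualPairs(matrix):
--     n = len(matrix)
--     count = 0
--     for i in range(n):
--         for j in range(n):
--             if all(matrix[i][k] == matrix[k][j] for k in range(n)):
--                 count += 1
--     return count
-- ===== Notes on version B (the rewrite author's own statement) =====
-- stated objective: simpler
-- what changed: Replaces the column-tuple counting dictionary plus row-lookup pass by a direct double loop that compares row i against column j element-wise with all(), so no hash map or tuple keys are built.
import Mathlib
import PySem

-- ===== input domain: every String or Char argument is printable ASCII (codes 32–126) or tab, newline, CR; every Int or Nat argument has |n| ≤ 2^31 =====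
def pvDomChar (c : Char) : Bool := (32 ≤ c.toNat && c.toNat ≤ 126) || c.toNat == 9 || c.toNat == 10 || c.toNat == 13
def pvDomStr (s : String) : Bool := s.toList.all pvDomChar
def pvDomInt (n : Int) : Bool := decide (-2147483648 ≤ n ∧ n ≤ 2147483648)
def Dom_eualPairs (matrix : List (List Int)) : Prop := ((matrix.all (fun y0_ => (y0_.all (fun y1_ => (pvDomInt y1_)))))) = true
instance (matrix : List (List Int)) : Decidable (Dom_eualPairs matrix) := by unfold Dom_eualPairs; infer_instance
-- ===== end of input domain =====

-- B replaces A's column-counting dictionary by a direct row-vs-column double scan (simpler, no hash map).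

-- shared indexing helper: matrix[i][j] (Python raises out of range; here Option default, excluded by Pre_)
def pvGet2 (m : List (List Int)) (i j : Int) : Int :=
  (PySem.List.pyGet? ((PySem.List.pyGet? m i).getD []) j).getD 0

-- ===== PORT A =====
def eualPairs (matrix : List (List Int)) : Int :=
  let n : Int := matrix.length
  let colDict : PySem.Dict (List Int) Int :=
    (PySem.List.pyRange 0 n 1).foldl (fun d r =>
      let colData := (PySem.List.pyRange 0 n 1).map (fun c => pvGet2 matrix c r)
      if d.contains colData then d.insert colData (d.getD colData 0 + 1)
      else d.insert colData 1) PySem.Dict.empty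
  (PySem.List.pyRange 0 n 1).foldl (fun count r =>
      let colData := (PySem.List.pyRange 0 n 1).map (fun c => pvGet2 matrix r c)
      if colDict.contains colData then count + colDict.getD colData 0 else count) 0

-- ===== PORT B =====
def eualPairs_alt (matrix : List (List Int)) : Int :=
  let n : Int := matrix.length
  (PySem.List.pyRange 0 n 1).foldl (fun count i =>
    (PySem.List.pyRange 0 n 1).foldl (fun count j =>
      if (PySem.List.pyRange 0 n 1).all (fun k => pvGet2 matrix i k == pvGet2 matrix k j)
      then count + 1 else count) count) 0

-- ===== PRECONDITION & SPEC =====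
-- Pre_ excludes ragged matrices with a row shorter than len(matrix), on which the Python A raises IndexError.
def Pre_eualPairs (matrix : List (List Int)) : Prop :=
  ∀ row ∈ matrix, matrix.length ≤ row.length
instance (matrix : List (List Int)) : Decidable (Pre_eualPairs matrix) := by unfold Pre_eualPairs; infer_instance
def pvWitness_eualPairs : List (List Int) := [[1, 2], [2, 1]]

def Spec_eualPairs (matrix : List (List Int)) (out : Int) : Prop := out = eualPairs_alt matrix
instance (matrix : List (List Int)) (out : Int) : Decidable (Spec_eualPairs matrix out) := by unfold Spec_eualPairs; infer_instance

-- ===== CLAIM (what is proved, stated in full; the proofs are below) =====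
def Claim_equal_eualPairs : Prop := ∀ (matrix : List (List Int)), Dom_eualPairs matrix → Pre_eualPairs matrix → Spec_eualPairs matrix (eualPairs matrix)

-- ===== LEMMAS AND PROOFS =====

-- A's if/else counting step is the insert-(getD+1) step
theorem pv_step_eq (d : PySem.Dict (List Int) Int) (k : List Int) :
    (if d.contains k then d.insert k (d.getD k 0 + 1) else d.insert k 1)
      = d.insert k (d.getD k 0 + 1) := by
  by_cases h : d.contains k = true
  · simp [h]
  · simp only [Bool.not_eq_true] at h
    simp [h, PySem.Dict.getD_of_not_contains _ _ h]

theorem pv_step_getD (d : PySem.Dict (List Int) Int) (k v : List Int) :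
    (if d.contains k then d.insert k (d.getD k 0 + 1) else d.insert k 1).getD v 0
      = d.getD v 0 + (if k == v then 1 else 0) := by
  rw [pv_step_eq, PySem.Dict.getD_insert]
  by_cases h : v = k
  · subst h; simp
  · simp [h]
    exact fun h' => h h'.symm

-- the dictionary built by A's first loop counts the column tuples
theorem pv_dict_getD (colK : Int → List Int) (R : List Int)
    (d : PySem.Dict (List Int) Int) (v : List Int) :
    (R.foldl (fun d r =>
        if d.contains (colK r) then d.insert (colK r) (d.getD (colK r) 0 + 1)
        else d.insert (colK r) 1) d).getD v 0
      = d.getD v 0 + (R.countP (fun r => colK r == v) : Int) := by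
  induction R generalizing d with
  | nil => simp
  | cons x t ih =>
    rw [List.foldl_cons, ih, pv_step_getD, List.countP_cons]
    by_cases h : (colK x == v) = true <;> simp [h] <;> ring

-- a fold adding (if p x then 1 else 0) counts
theorem pv_foldl_countP (p : Int → Bool) (l : List Int) (c : Int) :
    l.foldl (fun c x => if p x then c + 1 else c) c = c + (l.countP p : Int) := by
  induction l generalizing c with
  | nil => simp
  | cons x t ih =>
    rw [List.foldl_cons, List.countP_cons]
    by_cases h : p x = true <;> simp [h, ih] <;> ring

-- A's two passes equal B's double scan, for abstract row/column key functions
theorem pv_AB (R : List Int) (rowK colK : Int → List Int) (all2 : Int → Int → Bool)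
    (hp : ∀ i j, all2 i j = (colK j == rowK i)) :
    (R.foldl (fun (count : Int) r =>
        if (R.foldl (fun (d : PySem.Dict (List Int) Int) r =>
              if d.contains (colK r) then d.insert (colK r) (d.getD (colK r) 0 + 1)
              else d.insert (colK r) 1) PySem.Dict.empty).contains (rowK r)
        then count + (R.foldl (fun (d : PySem.Dict (List Int) Int) r =>
              if d.contains (colK r) then d.insert (colK r) (d.getD (colK r) 0 + 1)
              else d.insert (colK r) 1) PySem.Dict.empty).getD (rowK r) 0
        else count) 0)
      = R.foldl (fun (count : Int) i =>
          R.foldl (fun count j => if all2 i j then count + 1 else count) count) 0 := by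
  have hget : ∀ v, (R.foldl (fun (d : PySem.Dict (List Int) Int) r =>
        if d.contains (colK r) then d.insert (colK r) (d.getD (colK r) 0 + 1)
        else d.insert (colK r) 1) PySem.Dict.empty).getD v 0
      = (R.countP (fun r => colK r == v) : Int) := by
    intro v; rw [pv_dict_getD]; simp
  calc (R.foldl (fun (count : Int) r =>
        if (R.foldl (fun (d : PySem.Dict (List Int) Int) r =>
              if d.contains (colK r) then d.insert (colK r) (d.getD (colK r) 0 + 1)
              else d.insert (colK r) 1) PySem.Dict.empty).contains (rowK r)
        then count + (R.foldl (fun (d : PySem.Dict (List Int) Int) r =>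
              if d.contains (colK r) then d.insert (colK r) (d.getD (colK r) 0 + 1)
              else d.insert (colK r) 1) PySem.Dict.empty).getD (rowK r) 0
        else count) 0)
      = R.foldl (fun (count : Int) r =>
          count + (R.countP (fun j => colK j == rowK r) : Int)) 0 := by
        apply PySem.List.foldl_congr_mem
        intro c r _
        by_cases h : (R.foldl (fun (d : PySem.Dict (List Int) Int) r =>
              if d.contains (colK r) then d.insert (colK r) (d.getD (colK r) 0 + 1)
              else d.insert (colK r) 1) PySem.Dict.empty).contains (rowK r) = true
        · simp [h, hget]
        · simp only [Bool.not_eq_true] at h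
          have h0 : ((R.countP (fun j => colK j == rowK r) : Nat) : Int) = 0 := by
            rw [← hget (rowK r)]
            exact PySem.Dict.getD_of_not_contains _ _ h
          simp [h, h0]
    _ = R.foldl (fun (count : Int) i =>
          R.foldl (fun count j => if all2 i j then count + 1 else count) count) 0 := by
        apply PySem.List.foldl_congr_mem
        intro c i _
        rw [← pv_foldl_countP (fun j => colK j == rowK i) R c]
        apply PySem.List.foldl_congr_mem
        intro c' j _
        rw [hp i j]

-- ===== VERDICT (by name: the statement is the Claim_ definition above) =====
theorem eualPairs_spec : Claim_equal_eualPairs := by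
  intro matrix _ _
  unfold Spec_eualPairs
  simp only [eualPairs, eualPairs_alt]
  exact pv_AB (PySem.List.pyRange 0 (matrix.length : Int) 1)
    (fun r => (PySem.List.pyRange 0 (matrix.length : Int) 1).map (fun c => pvGet2 matrix r c))
    (fun r => (PySem.List.pyRange 0 (matrix.length : Int) 1).map (fun c => pvGet2 matrix c r))
    (fun i j => (PySem.List.pyRange 0 (matrix.length : Int) 1).all
        (fun k => pvGet2 matrix i k == pvGet2 matrix k j))
    (by
      intro i j
      rw [Bool.eq_iff_iff]
      simp only [List.all_eq_true, beq_iff_eq, List.map_inj_left]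
      constructor
      · intro h a ha
        exact (h a ha).symm
      · intro h a ha
        exact (h a ha).symm)
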